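-- pv_equiv track=rewrite | github.com/ASH-LABS-02/credit-analyzer | backend/app/services/legal_case_api.py | _generate_concerns
-- ===== SOURCE A (Python) =====
-- from typing import Dict, Any, List, Optional
--
-- def _generate_concerns(ongoing_cases: List) -> List[str]:
--     """
--     Generate key concerns from ongoing cases
--     """
--     if not ongoing_cases:
--         return []
--
--     concerns = []
--
--     if len(ongoing_cases) > 5:
--         concerns.append(f"High volume of ongoing cases ({len(ongoing_cases)} active cases)")
--
--     high_severity = [c for c in ongoing_cases if c.get("severity") in ["high", "critical"]]
--     if high_severity:
--         concerns.append(f"{len(high_severity)} high-severity cases requiring attention")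
--
--     criminal_cases = [c for c in ongoing_cases if "criminal" in c.get("case_type", "").lower()]
--     if criminal_cases:
--         concerns.append(f"{len(criminal_cases)} criminal cases may impact reputation")
--
--     if not concerns:
--         concerns.append("Multiple ongoing legal proceedings")
--
--     return concerns[:5]
-- ===== SOURCE B (Python) =====
-- def _generate_concerns(ongoing_cases):
--     """
--     Generate key concerns via a histogram over a two-flag classification.
--     """
--     if not ongoing_cases:
--         return []
--
--     # classify every case into a (high-severity?, criminal?) tag, then histogram the tags
--     tags = [(c.get("severity") in ("high", "critical"),
--              "criminal" in c.get("case_type", "").lower())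
--             for c in ongoing_cases]
--     hist = {}
--     for t in tags:
--         hist[t] = hist.get(t, 0) + 1
--
--     high = hist.get((True, True), 0) + hist.get((True, False), 0)
--     crim = hist.get((True, True), 0) + hist.get((False, True), 0)
--
--     # assemble the concerns back-to-front by prepending
--     concerns = []
--     if crim:
--         concerns.insert(0, f"{crim} criminal cases may impact reputation")
--     if high:
--         concerns.insert(0, f"{high} high-severity cases requiring attention")
--     if len(ongoing_cases) > 5:
--         concerns.insert(0, f"High volume of ongoing cases ({len(ongoing_cases)} active cases)")
--     return concerns or ["Multiple ongoing legal proceedings"]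
-- ===== Notes on version B (the rewrite author's own statement) =====
-- stated objective: alternative
-- what changed: Instead of filtering ongoing_cases twice and measuring the filtered lists, B classifies each case once into a (high?, criminal?) tag, builds a dict histogram of the tags in one pass, derives both counts from histogram lookups, and assembles the concerns list back-to-front by prepending with an or-fallback instead of appends plus a [:5] slice.
import Mathlib
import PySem

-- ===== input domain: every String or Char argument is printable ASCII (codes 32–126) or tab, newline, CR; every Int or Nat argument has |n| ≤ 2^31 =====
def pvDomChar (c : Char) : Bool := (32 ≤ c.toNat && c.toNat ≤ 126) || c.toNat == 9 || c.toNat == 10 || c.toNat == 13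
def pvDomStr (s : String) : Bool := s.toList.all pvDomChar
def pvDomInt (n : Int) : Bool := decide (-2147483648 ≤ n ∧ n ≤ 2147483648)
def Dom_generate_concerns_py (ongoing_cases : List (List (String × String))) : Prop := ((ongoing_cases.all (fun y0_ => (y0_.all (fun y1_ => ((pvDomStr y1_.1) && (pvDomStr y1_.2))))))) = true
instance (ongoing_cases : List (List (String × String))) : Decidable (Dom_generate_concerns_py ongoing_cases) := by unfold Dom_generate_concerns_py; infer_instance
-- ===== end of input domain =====

-- B replaces A's two filtering passes by one classification pass into a dict histogram of
-- (high?, criminal?) tags, reads both counts off the histogram, and assembles the result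
-- back-to-front by prepending (alternative decomposition, same cost).

-- shared case predicates: c.get("severity") in ["high", "critical"]
def pvIsHighSev (c : List (String × String)) : Bool :=
  let s := (PySem.Dict.mk c).get? "severity"
  s == some "high" || s == some "critical"

-- "criminal" in c.get("case_type", "").lower()
def pvIsCriminal (c : List (String × String)) : Bool :=
  PySem.Str.isIn "criminal" (PySem.Str.lower ((PySem.Dict.mk c).getD "case_type" ""))

-- ===== PORT A =====
def generate_concerns_py (ongoing_cases : List (List (String × String))) : List String :=
  if ongoing_cases = [] then []
  else
    let concerns : List String := []
    let concerns := if 5 < ongoing_cases.length then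
        concerns ++ ["High volume of ongoing cases (" ++ PySem.Int.toStr (ongoing_cases.length : Int) ++ " active cases)"]
      else concerns
    let high_severity := ongoing_cases.filter pvIsHighSev
    let concerns := if high_severity ≠ [] then
        concerns ++ [PySem.Int.toStr (high_severity.length : Int) ++ " high-severity cases requiring attention"]
      else concerns
    let criminal_cases := ongoing_cases.filter pvIsCriminal
    let concerns := if criminal_cases ≠ [] then
        concerns ++ [PySem.Int.toStr (criminal_cases.length : Int) ++ " criminal cases may impact reputation"]
      else concerns
    let concerns := if concerns = [] then concerns ++ ["Multiple ongoing legal proceedings"] else concerns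
    PySem.List.slice concerns none (some 5)

-- ===== PORT B =====
-- the (high-severity?, criminal?) classification tag of one case
def pvTag (c : List (String × String)) : Bool × Bool := (pvIsHighSev c, pvIsCriminal c)

def generate_concerns_py_alt (ongoing_cases : List (List (String × String))) : List String :=
  if ongoing_cases = [] then []
  else
    let tags := ongoing_cases.map pvTag
    -- hist[t] = hist.get(t, 0) + 1 over the tags
    let hist := tags.foldl (fun (d : PySem.Dict (Bool × Bool) Int) t => d.insert t (d.getD t 0 + 1)) PySem.Dict.empty
    let high := hist.getD (true, true) 0 + hist.getD (true, false) 0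
    let crim := hist.getD (true, true) 0 + hist.getD (false, true) 0
    -- concerns.insert(0, …) = prepend
    let concerns : List String := []
    let concerns := if crim ≠ 0 then (PySem.Int.toStr crim ++ " criminal cases may impact reputation") :: concerns else concerns
    let concerns := if high ≠ 0 then (PySem.Int.toStr high ++ " high-severity cases requiring attention") :: concerns else concerns
    let concerns := if 5 < ongoing_cases.length then
        ("High volume of ongoing cases (" ++ PySem.Int.toStr (ongoing_cases.length : Int) ++ " active cases)") :: concerns
      else concerns
    if concerns = [] then ["Multiple ongoing legal proceedings"] else concerns

-- ===== PRECONDITION & SPEC =====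
def Spec_generate_concerns_py (ongoing_cases : List (List (String × String))) (out : List String) : Prop := out = generate_concerns_py_alt ongoing_cases
instance (ongoing_cases : List (List (String × String))) (out : List String) : Decidable (Spec_generate_concerns_py ongoing_cases out) := by unfold Spec_generate_concerns_py; infer_instance

-- ===== CLAIM =====
def Claim_equal_generate_concerns_py : Prop := ∀ (ongoing_cases : List (List (String × String))), Dom_generate_concerns_py ongoing_cases → Spec_generate_concerns_py ongoing_cases (generate_concerns_py ongoing_cases)

-- ===== LEMMAS AND PROOFS =====

-- B's histogram lookups recover the lengths of A's two filtered lists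
theorem pvHighOfHist (l : List (List (String × String))) :
    ((l.map pvTag).count (true, true) : Int) + ((l.map pvTag).count (true, false) : Int)
      = ((l.filter pvIsHighSev).length : Int) := by
  induction l with
  | nil => simp
  | cons h t ih =>
    simp only [List.map_cons, List.count_cons, List.filter_cons, pvTag]
    by_cases h1 : pvIsHighSev h <;> by_cases h2 : pvIsCriminal h <;>
      simp [h1, h2] <;> omega

theorem pvCrimOfHist (l : List (List (String × String))) :
    ((l.map pvTag).count (true, true) : Int) + ((l.map pvTag).count (false, true) : Int)
      = ((l.filter pvIsCriminal).length : Int) := by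
  induction l with
  | nil => simp
  | cons h t ih =>
    simp only [List.map_cons, List.count_cons, List.filter_cons, pvTag]
    by_cases h1 : pvIsHighSev h <;> by_cases h2 : pvIsCriminal h <;>
      simp [h1, h2] <;> omega

theorem pvHistGetD (l : List (Bool × Bool)) (v : Bool × Bool) :
    (l.foldl (fun (d : PySem.Dict (Bool × Bool) Int) t => d.insert t (d.getD t 0 + 1)) PySem.Dict.empty).getD v 0
      = (l.count v : Int) := by
  rw [PySem.Dict.foldl_insert_getD_add_one_eq_counter, PySem.Dict.getD_counter]

theorem pvSliceFive (xs : List String) (h : xs.length ≤ 5) :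
    PySem.List.slice xs none (some 5) = xs := by
  have h5 : (5 : Int) = ((5 : Nat) : Int) := rfl
  rw [h5, PySem.List.slice_to_natCast, List.take_of_length_le h]

-- ===== VERDICT =====
theorem generate_concerns_py_spec : Claim_equal_generate_concerns_py := by
  intro oc _
  unfold Spec_generate_concerns_py generate_concerns_py generate_concerns_py_alt
  by_cases hnil : oc = []
  · simp [hnil]
  · simp only [if_neg hnil, pvHistGetD, pvHighOfHist, pvCrimOfHist]
    by_cases hv : 5 < oc.length <;>
      by_cases hs : oc.filter pvIsHighSev = [] <;>
        by_cases hc : oc.filter pvIsCriminal = [] <;>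
          simp [hv, hs, hc, pvSliceFive, List.length_eq_zero_iff]
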